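-- pv_equiv track=rewrite | github.com/jasonbrackman/dailyprogrammer | challenge_366/easy.py | funnel
-- ===== SOURCE A (Python) =====
-- def funnel(first: str, second: str) -> bool:
--     """
--     Given two strings of letters, determine whether the second can be made
--     from the first by removing one letter. The remaining letters must stay in
--     the same order.
--     """
--
--     for index in range(len(first)):
--         word = list(first)
--         word[index] = ''
--         word = ''.join(word)
--         if second == word:
--             return True
--     return False
-- ===== SOURCE B (Python) =====
-- def funnel(first: str, second: str) -> bool:
--     # Two-pointer: length must differ by exactly one; skip the common
--     # prefix, then the rest of first (past one extra char) must equal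
--     # the rest of second.
--     if len(first) != len(second) + 1:
--         return False
--     i = 0
--     while i < len(second) and first[i] == second[i]:
--         i += 1
--     return first[i + 1:] == second[i:]
-- ===== Notes on version B (the rewrite author's own statement) =====
-- stated objective: faster
-- what changed: Replaced A's loop that rebuilds and compares a full copy of first for every deletion position with a single two-pointer pass: check the lengths differ by one, skip the common prefix, and compare the remaining suffixes once.
import Mathlib
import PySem

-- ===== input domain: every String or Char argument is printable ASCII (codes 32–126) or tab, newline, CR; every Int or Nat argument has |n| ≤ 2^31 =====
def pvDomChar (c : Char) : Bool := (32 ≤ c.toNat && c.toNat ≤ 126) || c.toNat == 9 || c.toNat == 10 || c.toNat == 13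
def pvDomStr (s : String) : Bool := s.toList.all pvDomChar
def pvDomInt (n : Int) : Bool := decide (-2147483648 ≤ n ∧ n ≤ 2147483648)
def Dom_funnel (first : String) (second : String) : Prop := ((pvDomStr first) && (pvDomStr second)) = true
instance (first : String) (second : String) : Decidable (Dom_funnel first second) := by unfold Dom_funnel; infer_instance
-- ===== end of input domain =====

-- ===== PORT A =====
-- A: for each index, rebuild first with that character blanked out (which,
-- after ''.join, is exactly the list with that index removed) and compare.
def funnel (first : String) (second : String) : Bool :=
  (List.range first.toList.length).any (fun index =>
    second.toList == first.toList.eraseIdx index)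

-- ===== PORT B =====
-- B: two-pointer scan; skip the common prefix, then compare suffixes once.
def funnelGo : List Char → List Char → Bool
  | a :: f, b :: s => if a == b then funnelGo f s else f == b :: s
  | _ :: f, [] => f == ([] : List Char)
  | [], _ => false

def funnel_alt (first : String) (second : String) : Bool :=
  let f := first.toList
  let s := second.toList
  if f.length == s.length + 1 then funnelGo f s else false

-- ===== PRECONDITION & SPEC =====
def Spec_funnel (first : String) (second : String) (out : Bool) : Prop := out = funnel_alt first second
instance (first : String) (second : String) (out : Bool) : Decidable (Spec_funnel first second out) := by unfold Spec_funnel; infer_instance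

-- ===== CLAIM (what is proved, stated in full; the proofs are below) =====
def Claim_equal_funnel : Prop := ∀ (first : String) (second : String), Dom_funnel first second → Spec_funnel first second (funnel first second)

-- ===== LEMMAS AND PROOFS =====
lemma funnelGo_iff (f s : List Char) (h : f.length = s.length + 1) :
    funnelGo f s = true ↔ ∃ i < f.length, f.eraseIdx i = s := by
  induction f generalizing s with
  | nil => simp at h
  | cons a f ih =>
    cases s with
    | nil =>
      have hf : f = [] := List.length_eq_zero_iff.mp (by simpa using h)
      subst hf
      constructor
      · intro _
        exact ⟨0, by simp, by simp⟩
      · intro _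
        simp [funnelGo]
    | cons b s =>
      have hlen : f.length = s.length + 1 := by simpa using h
      by_cases hab : a = b
      · subst hab
        simp only [funnelGo, beq_self_eq_true, if_true]
        rw [ih s hlen]
        constructor
        · rintro ⟨i, hi, he⟩
          exact ⟨i + 1, by simpa using hi, by simpa [List.eraseIdx] using he⟩
        · rintro ⟨i, hi, he⟩
          cases i with
          | zero =>
            simp only [List.eraseIdx] at he
            subst he
            exact ⟨0, by omega, by simp [List.eraseIdx]⟩
          | succ j =>
            refine ⟨j, by simpa using hi, ?_⟩
            simpa [List.eraseIdx] using he
      · simp only [funnelGo, beq_iff_eq, hab, if_false]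
        constructor
        · intro he
          exact ⟨0, by omega, by simpa [List.eraseIdx] using he⟩
        · rintro ⟨i, hi, he⟩
          cases i with
          | zero => simpa [List.eraseIdx] using he
          | succ j =>
            simp only [List.eraseIdx] at he
            exact absurd (List.cons.injEq .. ▸ he).1 hab

lemma key_funnel (f s : List Char) :
    ((List.range f.length).any fun i => s == f.eraseIdx i) =
      (if f.length == s.length + 1 then funnelGo f s else false) := by
  by_cases h : f.length = s.length + 1
  · rw [if_pos (by simpa using h)]
    rcases hgo : funnelGo f s with _ | _
    · rw [List.any_eq_false]
      intro i hi
      simp only [List.mem_range] at hi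
      intro hbe
      have he : s = f.eraseIdx i := by simpa using hbe
      exact absurd ((funnelGo_iff f s h).mpr ⟨i, hi, he.symm⟩) (by simp [hgo])
    · rcases (funnelGo_iff f s h).mp hgo with ⟨i, hi, he⟩
      rw [List.any_eq_true]
      exact ⟨i, List.mem_range.mpr hi, by simp [he]⟩
  · rw [if_neg (by simpa using h), List.any_eq_false]
    intro i hi
    simp only [List.mem_range] at hi
    intro hbe
    have he : s = f.eraseIdx i := by simpa using hbe
    have := List.length_eraseIdx (l := f) (i := i)
    rw [he] at h
    simp [hi] at this
    omega

lemma funnel_eq_alt (first second : String) :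
    funnel first second = funnel_alt first second := by
  unfold funnel funnel_alt
  exact key_funnel first.toList second.toList

-- ===== VERDICT (by name: the statement is the Claim_ definition above) =====
theorem funnel_spec : Claim_equal_funnel := by
  intro first second _
  unfold Spec_funnel
  exact funnel_eq_alt first second
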